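-- pv_equiv track=rewrite | github.com/adityajadhav-quant/codebase | day4.py | solution
-- ===== SOURCE A (Python) =====
-- def solution(A, F, M):
--     known_sum = sum(A)
--     total_rolls = len(A) + F
--     target_total_sum = M * total_rolls
--     required_missing_sum = target_total_sum - known_sum
--
--     # The missing sum must fit within F dice values (each 1..6)
--     min_possible = F * 1
--     max_possible = F * 6
--
--     # If a required sum is impossible → no solution
--     if not (min_possible <= required_missing_sum <= max_possible):
--         return [0]
--
--     # Build the answer starting with all dice set to 1
--     missing_rolls = [1] * F
--     remaining_sum = required_missing_sum - F  # we already placed F ones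
--
--     # Distribute remaining_sum by increasing dice values up to 6
--     idx = 0
--     while remaining_sum > 0 and idx < F:
--         addable = min(5, remaining_sum)  # max we can add to a '1' is +5 (to reach 6)
--         missing_rolls[idx] += addable
--         remaining_sum -= addable
--         idx += 1
--
--     return missing_rolls
-- ===== SOURCE B (Python) =====
-- def solution(A, F, M):
--     required_missing_sum = M * (len(A) + F) - sum(A)
--     if not (F <= required_missing_sum <= 6 * F):
--         return [0]
--     t = required_missing_sum - F
--     q, r = divmod(t, 5)
--     return [6] * q + ([1 + r] if r else []) + [1] * (F - q - (1 if r else 0))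
-- ===== Notes on version B (the rewrite author's own statement) =====
-- stated objective: simpler
-- what changed: Replaces the while-loop that bumps dice one at a time with a closed-form divmod: q full sixes, one partial die 1+r when r>0, and ones for the rest.
import Mathlib
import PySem

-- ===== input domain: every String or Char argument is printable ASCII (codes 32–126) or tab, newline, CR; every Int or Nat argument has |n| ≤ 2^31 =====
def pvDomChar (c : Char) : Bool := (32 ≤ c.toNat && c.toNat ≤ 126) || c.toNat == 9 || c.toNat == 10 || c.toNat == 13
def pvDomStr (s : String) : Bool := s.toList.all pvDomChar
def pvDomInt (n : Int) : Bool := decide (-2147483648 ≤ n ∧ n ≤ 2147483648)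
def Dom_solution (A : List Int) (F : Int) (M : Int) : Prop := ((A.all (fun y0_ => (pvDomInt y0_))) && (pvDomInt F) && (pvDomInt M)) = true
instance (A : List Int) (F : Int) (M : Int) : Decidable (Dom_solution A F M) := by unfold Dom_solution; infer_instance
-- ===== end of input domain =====

-- B replaces A's while-loop with a closed-form divmod allocation; objective: simpler.
-- ===== PORT A =====
-- while remaining_sum > 0 and idx < F: add min(5, remaining) to rolls[idx], advance idx
def solLoopA (rolls : List Int) (remaining idx F : Int) : List Int :=
  if h : remaining > 0 ∧ idx < F then
    let addable := min 5 remaining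
    solLoopA (rolls.set idx.toNat (rolls.getD idx.toNat 0 + addable))
      (remaining - addable) (idx + 1) F
  else rolls
termination_by (F - idx).toNat
decreasing_by omega

def solution (A : List Int) (F : Int) (M : Int) : List Int :=
  let known_sum := A.sum
  let total_rolls : Int := (A.length : Int) + F
  let target_total_sum := M * total_rolls
  let required_missing_sum := target_total_sum - known_sum
  let min_possible := F * 1
  let max_possible := F * 6
  if ¬ (min_possible ≤ required_missing_sum ∧ required_missing_sum ≤ max_possible) then [0]
  else
    let missing_rolls := List.replicate F.toNat (1 : Int)
    let remaining_sum := required_missing_sum - F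
    solLoopA missing_rolls remaining_sum 0 F

-- ===== PORT B =====
def solution_alt (A : List Int) (F : Int) (M : Int) : List Int :=
  let required_missing_sum := M * ((A.length : Int) + F) - A.sum
  if ¬ (F ≤ required_missing_sum ∧ required_missing_sum ≤ 6 * F) then [0]
  else
    let t := required_missing_sum - F
    let q := PySem.Int.floordiv t 5
    let r := PySem.Int.mod t 5
    List.replicate q.toNat (6 : Int)
      ++ (if r ≠ 0 then [1 + r] else [])
      ++ List.replicate (F - q - (if r ≠ 0 then 1 else 0)).toNat (1 : Int)
-- ===== PRECONDITION & SPEC =====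
def Spec_solution (A : List Int) (F : Int) (M : Int) (out : List Int) : Prop := out = solution_alt A F M
instance (A : List Int) (F : Int) (M : Int) (out : List Int) : Decidable (Spec_solution A F M out) := by unfold Spec_solution; infer_instance

-- ===== CLAIM (what is proved, stated in full; the proofs are below) =====
def Claim_equal_solution : Prop := ∀ (A : List Int) (F : Int) (M : Int), Dom_solution A F M → Spec_solution A F M (solution A F M)

-- ===== LEMMAS AND PROOFS =====
-- closed form of the loop result over a natural count n of untouched dice
def solClosed (n : Nat) (t : Nat) : List Int :=
  List.replicate (t / 5) (6 : Int)
    ++ (if t % 5 ≠ 0 then [(1 : Int) + (t % 5 : Nat)] else [])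
    ++ List.replicate (n - t / 5 - (if t % 5 ≠ 0 then 1 else 0)) (1 : Int)

lemma solLoopA_eq_closed (n : Nat) : ∀ (t : Int) (pre : List Int), 0 ≤ t → t ≤ 5 * n →
    solLoopA (pre ++ List.replicate n (1 : Int)) t (pre.length) ((pre.length : Int) + n)
      = pre ++ solClosed n t.toNat := by
  induction n with
  | zero =>
    intro t pre ht0 ht5
    have : t = 0 := by omega
    subst this
    rw [solLoopA]
    simp [solClosed]
  | succ m ih =>
    intro t pre ht0 ht5
    rw [solLoopA]
    by_cases hpos : t > 0
    · have hlt : (pre.length : Int) < (pre.length : Int) + ((m + 1 : Nat) : Int) := by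
        push_cast; omega
      rw [dif_pos ⟨hpos, hlt⟩]
      have hget : (pre ++ List.replicate (m + 1) (1 : Int)).getD (pre.length : Int).toNat 0 = 1 := by
        simp [List.getD]
      have hset : ∀ v : Int, (pre ++ List.replicate (m + 1) (1 : Int)).set (pre.length : Int).toNat v
          = (pre ++ [v]) ++ List.replicate m (1 : Int) := by
        intro v
        rw [List.replicate_succ, List.set_append_right _ _ (by simp)]
        simp
      by_cases h5 : 5 ≤ t
      · have hmin : min (5 : Int) t = 5 := by omega
        simp only [hmin, hget, hset]
        have e1 : ((pre.length : Int) + 1) = (((pre ++ [(1 : Int) + 5]).length : Nat) : Int) := by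
          simp
        have e2 : ((pre.length : Int) + ((m + 1 : Nat) : Int))
            = (((pre ++ [(1 : Int) + 5]).length : Nat) : Int) + (m : Int) := by
          simp only [List.length_append, List.length_cons, List.length_nil]
          push_cast; ring
        rw [e1, e2, ih (t - 5) (pre ++ [(1 : Int) + 5]) (by omega) (by push_cast at ht5 ⊢; omega)]
        have h15 : (1 : Int) + 5 = 6 := by norm_num
        rw [h15]
        have ht5n : (t - 5).toNat = t.toNat - 5 := by omega
        rw [ht5n]
        simp only [solClosed, List.append_assoc]
        have hq : t.toNat / 5 = (t.toNat - 5) / 5 + 1 := by omega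
        have hr : t.toNat % 5 = (t.toNat - 5) % 5 := by omega
        rw [hq, hr, List.replicate_succ]
        simp only [List.cons_append, List.append_assoc, List.nil_append]
        have hc : m + 1 - ((t.toNat - 5) / 5 + 1) = m - (t.toNat - 5) / 5 := by omega
        rw [hc]
      · have hmin : min (5 : Int) t = t := by omega
        simp only [hmin, hget, hset]
        rw [solLoopA]
        rw [dif_neg (by simp)]
        simp only [solClosed]
        have hq : t.toNat / 5 = 0 := by omega
        have hr : t.toNat % 5 = t.toNat := by omega
        have hne : t.toNat % 5 ≠ 0 := by omega
        rw [hq, hr]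
        rw [if_pos (hr ▸ hne), if_pos (hr ▸ hne)]
        have hct : ((t.toNat : Int)) = t := by omega
        simp [hct, List.append_assoc]
    · have ht : t = 0 := by omega
      subst ht
      rw [dif_neg (by simp)]
      simp [solClosed]

-- ===== VERDICT (by name: the statement is the Claim_ definition above) =====
theorem solution_spec : Claim_equal_solution := by
  intro A F M _hdom
  unfold Spec_solution
  simp only [solution, solution_alt]
  set req := M * ((A.length : Int) + F) - A.sum with hreq
  by_cases hg : F * 1 ≤ req ∧ req ≤ F * 6
  · have hg' : F ≤ req ∧ req ≤ 6 * F := ⟨by linarith [hg.1], by linarith [hg.2]⟩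
    have hF0 : 0 ≤ F := by nlinarith [hg.1, hg.2]
    rw [if_neg (not_not_intro hg), if_neg (not_not_intro hg')]
    set t := req - F with htdef
    have ht0 : 0 ≤ t := by omega
    have ht5 : t ≤ 5 * ((F.toNat : Nat) : Int) := by omega
    have hmain := solLoopA_eq_closed F.toNat t [] ht0 (by exact_mod_cast ht5)
    simp only [List.nil_append, List.length_nil, Nat.cast_zero, zero_add] at hmain
    have hFcast : ((F.toNat : Int)) = F := by omega
    rw [hFcast] at hmain
    rw [hmain]
    have hfd : PySem.Int.floordiv t 5 = t / 5 := PySem.Int.floordiv_eq_ediv_of_pos (by norm_num)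
    have hmd : PySem.Int.mod t 5 = t % 5 := PySem.Int.mod_eq_emod_of_pos (by norm_num)
    simp only [solClosed, hfd, hmd]
    have hq : ((t / 5).toNat) = t.toNat / 5 := by omega
    by_cases hr : t.toNat % 5 = 0
    · have h1 : ¬ (t.toNat % 5 ≠ 0) := by omega
      have h2 : ¬ (t % 5 ≠ 0) := by omega
      rw [if_neg h1, if_neg h2]
      rw [hq]
      congr 1
      congr 1
      split_ifs <;> omega
    · have h1 : (t.toNat % 5 ≠ 0) := hr
      have h2 : (t % 5 ≠ 0) := by omega
      rw [if_pos h1, if_pos h2]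
      rw [hq]
      have hcm : ((t.toNat % 5 : Nat) : Int) = t % 5 := by omega
      rw [hcm]
      congr 1
      congr 1
      split_ifs <;> omega
  · have hg' : ¬ (F ≤ req ∧ req ≤ 6 * F) := by
      intro h
      exact hg ⟨by linarith [h.1], by linarith [h.2]⟩
    rw [if_pos hg, if_pos hg']
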